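-- pv_equiv track=rewrite | github.com/denuwanhendalage/Python | BFS.py | process_inquiries
-- ===== SOURCE A (Python) =====
-- from collections import deque
--
-- def process_inquiries(tree):
--
--     if not tree:
--         return []
--     queue = deque(['root'])
--     processed_order = []
--     while queue:
--         # Dequeue the next inquiry
--         inquiry = queue.popleft()
--         # Add the inquiry to the processed order
--         processed_order.append(inquiry)
--         # Enqueue all follow-up inquiries
--         for follow_up in tree.get(inquiry, []):
--             queue.append(follow_up)
--     return processed_order
-- ===== SOURCE B (Python) =====
-- def process_inquiries(tree):
--     # Depth-first recursion that buckets every visited node by its depth,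
--     # then flattens the buckets; same level order as a queue BFS, no queue.
--     if not tree:
--         return []
--
--     def levels(node):
--         buckets = [[node]]
--         for child in tree.get(node, []):
--             for depth, nodes in enumerate(levels(child), 1):
--                 if depth == len(buckets):
--                     buckets.append([])
--                 buckets[depth].extend(nodes)
--         return buckets
--
--     order = []
--     for level in levels('root'):
--         order.extend(level)
--     return order
-- ===== Notes on version B (the rewrite author's own statement) =====
-- stated objective: alternative
-- what changed: Replaced the FIFO-queue BFS by a depth-first recursion that buckets every visited node by its depth and flattens the buckets level by level; same level order, no queue.
import Mathlib
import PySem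

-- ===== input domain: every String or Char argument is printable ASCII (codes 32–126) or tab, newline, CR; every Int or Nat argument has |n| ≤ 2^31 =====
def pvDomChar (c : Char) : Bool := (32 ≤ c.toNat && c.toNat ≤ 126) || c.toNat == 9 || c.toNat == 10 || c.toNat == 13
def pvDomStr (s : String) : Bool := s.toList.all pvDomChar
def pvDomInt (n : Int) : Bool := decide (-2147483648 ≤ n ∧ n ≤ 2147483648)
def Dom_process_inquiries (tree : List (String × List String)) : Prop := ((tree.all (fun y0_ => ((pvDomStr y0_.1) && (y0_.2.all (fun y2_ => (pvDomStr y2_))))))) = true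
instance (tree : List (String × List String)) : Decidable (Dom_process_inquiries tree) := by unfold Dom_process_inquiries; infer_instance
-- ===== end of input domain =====

-- B replaces A's FIFO-queue BFS by a depth-first recursion that buckets every visited node
-- by its depth and flattens the buckets; same return value, a different traversal.

-- ===== PORT A =====

-- `tree.get(k, [])`: the dict is an association list; a Python dict has unique keys, so first match is the match.
def pvGet (tree : List (String × List String)) (k : String) : List String :=
  match tree.find? (fun p => p.1 == k) with
  | some p => p.2
  | none => []

-- A's `while queue:` loop. The fuel argument only makes the loop total; the proofs below show
-- that under Pre_ the fuel passed by `process_inquiries` is never exhausted.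
def pvBfsA (tree : List (String × List String)) :
    Nat → List String → List String → List String
  | _, [], acc => acc
  | 0, _, acc => acc
  | fuel+1, q :: qs, acc => pvBfsA tree fuel (qs ++ pvGet tree q) (acc ++ [q])

-- fuel bound: (#keys+2) · ((#children+1)^(#keys+1) + 1) dominates the number of pops (proved below)
def pvFuelA (tree : List (String × List String)) : Nat :=
  ((tree.map Prod.fst).length + 2) *
    (((tree.flatMap Prod.snd).length + 1) ^ ((tree.map Prod.fst).length + 1) + 1)

def process_inquiries (tree : List (String × List String)) : List String :=
  if tree = [] then []
  else pvBfsA tree (pvFuelA tree) ["root"] []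

-- ===== PORT B =====

-- Source B's inner `for depth, nodes in enumerate(levels(child), 1): buckets[depth].extend(nodes)`
-- (growing `buckets` on demand): a level-wise append of two bucket lists, keeping the leftover.
def pvMerge : List (List String) → List (List String) → List (List String)
  | xs, [] => xs
  | [], ys => ys
  | x :: xs, y :: ys => (x ++ y) :: pvMerge xs ys

-- Source B's recursive `levels(node)`: buckets start as [[node]]; each child's buckets are merged
-- in one level down (bucket 0 = [node] is never touched, so it is kept as the fixed head).
-- The fuel only makes the recursion total; under Pre_ it is never exhausted.
def pvLevels (tree : List (String × List String)) : Nat → String → List (List String)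
  | 0, _ => []
  | f+1, node =>
      [node] :: (pvGet tree node).foldl (fun rest c => pvMerge rest (pvLevels tree f c)) []

-- Source B's final `for level in levels('root'): order.extend(level)`
def process_inquiries_alt (tree : List (String × List String)) : List String :=
  if tree = [] then []
  else ((pvLevels tree ((tree.map Prod.fst).length + 2) "root").foldl
          (fun acc lv => acc ++ lv) [])

-- ===== PRECONDITION & SPEC =====

-- one step of graph closure: add every child of a member, dedup
def pvStepC (tree : List (String × List String)) (s : List String) : List String :=
  (s ++ s.flatMap (pvGet tree)).dedup

def pvClose (tree : List (String × List String)) : Nat → List String → List String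
  | 0, s => s
  | f+1, s => pvStepC tree (pvClose tree f s)

-- all nodes reachable from 'root' (the closure is stationary after #children+2 rounds)
def pvReachableL (tree : List (String × List String)) : List String :=
  pvClose tree ((tree.flatMap Prod.snd).length + 2) ["root"]

-- all proper descendants of k (closure of k's children list)
def pvDescendL (tree : List (String × List String)) (k : String) : List String :=
  pvClose tree ((pvGet tree k).length + (tree.flatMap Prod.snd).length + 1) (pvGet tree k)

-- Pre_ excludes exactly the inputs on which A never returns: trees with a cycle reachable
-- from 'root' make A's queue loop run forever (and B's recursion bottomless). On every input
-- on which A returns — including DAGs where several parents share a child — Pre_ holds.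
def Pre_process_inquiries (tree : List (String × List String)) : Prop :=
  ∀ k ∈ pvReachableL tree, k ∉ pvDescendL tree k

instance (tree : List (String × List String)) : Decidable (Pre_process_inquiries tree) := by
  unfold Pre_process_inquiries; infer_instance

def pvWitness_process_inquiries : (List (String × List String)) :=
  [("root", ["a", "b"]), ("a", ["c"])]

def Spec_process_inquiries (tree : List (String × List String)) (out : List String) : Prop :=
  out = process_inquiries_alt tree
instance (tree : List (String × List String)) (out : List String) :
    Decidable (Spec_process_inquiries tree out) := by unfold Spec_process_inquiries; infer_instance

-- ===== CLAIM (what is proved, stated in full; the proofs are below) =====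
def Claim_equal_process_inquiries : Prop :=
  ∀ (tree : List (String × List String)), Dom_process_inquiries tree →
    Pre_process_inquiries tree → Spec_process_inquiries tree (process_inquiries tree)

-- ===== LEMMAS AND PROOFS =====

-- the k-th BFS frontier and the number of queue pops down to depth k
def pvIter (tree : List (String × List String)) : Nat → List String → List String
  | 0, fr => fr
  | k+1, fr => pvIter tree k (fr.flatMap (pvGet tree))

def pvPops (tree : List (String × List String)) : Nat → List String → Nat
  | 0, _ => 0
  | k+1, fr => fr.length + pvPops tree k (fr.flatMap (pvGet tree))

-- the true level decomposition from a frontier (fuel-truncated)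
def pvLF (tree : List (String × List String)) : Nat → List String → List (List String)
  | _, [] => []
  | 0, _ :: _ => []
  | f+1, x :: fr => (x :: fr) :: pvLF tree f ((x :: fr).flatMap (pvGet tree))

-- graph reachability from a set of start nodes (proof-side only)
inductive pvReachFrom (tree : List (String × List String)) (s : List String) : String → Prop
  | base {x : String} : x ∈ s → pvReachFrom tree s x
  | step {x y : String} : pvReachFrom tree s x → y ∈ pvGet tree x → pvReachFrom tree s y

-- ---- pvGet facts ----

lemma pvGet_entry (tree : List (String × List String)) (k : String) :
    pvGet tree k = [] ∨ (k, pvGet tree k) ∈ tree := by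
  unfold pvGet
  cases hf : tree.find? (fun p => p.1 == k) with
  | none => exact Or.inl rfl
  | some p =>
      right
      have hm := List.mem_of_find?_eq_some hf
      have hp : p.1 = k := by simpa using List.find?_some hf
      show (k, p.2) ∈ tree
      rw [← hp]
      simpa using hm

lemma mem_pvGet_entry {tree : List (String × List String)} {k x : String}
    (hx : x ∈ pvGet tree k) : (k, pvGet tree k) ∈ tree := by
  rcases pvGet_entry tree k with h | h
  · rw [h] at hx; cases hx
  · exact h

lemma mem_pvGet_flat {tree : List (String × List String)} {k x : String}
    (hx : x ∈ pvGet tree k) : x ∈ tree.flatMap Prod.snd :=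
  List.mem_flatMap.mpr ⟨(k, pvGet tree k), mem_pvGet_entry hx, hx⟩

lemma pvGet_key_mem {tree : List (String × List String)} {k x : String}
    (hx : x ∈ pvGet tree k) : k ∈ tree.map Prod.fst :=
  List.mem_map_of_mem (mem_pvGet_entry hx)

lemma snd_len_le {x : String} {c : List String} :
    ∀ {tree : List (String × List String)}, (x, c) ∈ tree →
      c.length ≤ (tree.flatMap Prod.snd).length := by
  intro tree
  induction tree with
  | nil => intro h; cases h
  | cons p ts ih =>
      intro h
      rw [List.flatMap_cons, List.length_append]
      rcases List.mem_cons.mp h with h | h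
      · rw [← h]; exact Nat.le_add_right _ _
      · have := ih h; omega

lemma pvGet_len_le (tree : List (String × List String)) (k : String) :
    (pvGet tree k).length ≤ (tree.flatMap Prod.snd).length := by
  rcases pvGet_entry tree k with h | h
  · rw [h]; simp
  · exact snd_len_le h

-- ---- size bounds for the fuel ----

lemma flat_len_le (tree : List (String × List String)) :
    ∀ fr : List String,
      (fr.flatMap (pvGet tree)).length ≤ fr.length * ((tree.flatMap Prod.snd).length + 1) := by
  intro fr
  induction fr with
  | nil => simp
  | cons a t ih =>
      rw [List.flatMap_cons, List.length_append, List.length_cons]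
      have := pvGet_len_le tree a
      have h2 : (t.length + 1) * ((tree.flatMap Prod.snd).length + 1)
          = t.length * ((tree.flatMap Prod.snd).length + 1)
            + ((tree.flatMap Prod.snd).length + 1) := by ring
      omega

lemma pops_le (tree : List (String × List String)) :
    ∀ (k : Nat) (fr : List String),
      pvPops tree k fr
        ≤ fr.length * ((k + 1) * ((tree.flatMap Prod.snd).length + 1) ^ k) := by
  intro k
  induction k with
  | zero => intro fr; simp [pvPops]
  | succ k ih =>
      intro fr
      set N := (tree.flatMap Prod.snd).length with hN
      have h1 : pvPops tree (k+1) fr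
          = fr.length + pvPops tree k (fr.flatMap (pvGet tree)) := rfl
      have h2 := ih (fr.flatMap (pvGet tree))
      have h3 := flat_len_le tree fr
      have h4 : (fr.flatMap (pvGet tree)).length * ((k + 1) * (N + 1) ^ k)
          ≤ fr.length * (N + 1) * ((k + 1) * (N + 1) ^ k) :=
        Nat.mul_le_mul_right _ h3
      have h5 : fr.length * (N + 1) * ((k + 1) * (N + 1) ^ k)
          = fr.length * ((k + 1) * (N + 1) ^ (k + 1)) := by ring
      have h6 : 1 ≤ (N + 1) ^ (k + 1) := Nat.one_le_pow _ _ (by omega)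
      have h7 : fr.length + fr.length * ((k + 1) * (N + 1) ^ (k + 1))
          ≤ fr.length * ((k + 2) * (N + 1) ^ (k + 1)) := by
        have : fr.length * ((k + 2) * (N + 1) ^ (k + 1))
            = fr.length * ((k + 1) * (N + 1) ^ (k + 1)) + fr.length * (N + 1) ^ (k + 1) := by ring
        have h8 : fr.length * 1 ≤ fr.length * (N + 1) ^ (k + 1) := Nat.mul_le_mul_left _ h6
        omega
      have h9 : fr.length * ((k + 1 + 1) * (N + 1) ^ (k + 1))
          = fr.length * ((k + 2) * (N + 1) ^ (k + 1)) := by norm_num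
      omega

-- ---- A's queue loop vs the level decomposition ----

lemma pvBfsA_nil (tree : List (String × List String)) (f : Nat) (acc : List String) :
    pvBfsA tree f [] acc = acc := by cases f <;> rfl

lemma pvBfsA_level (tree : List (String × List String)) :
    ∀ (q1 q2 acc : List String) (g : Nat),
      pvBfsA tree (q1.length + g) (q1 ++ q2) acc
        = pvBfsA tree g (q2 ++ q1.flatMap (pvGet tree)) (acc ++ q1) := by
  intro q1
  induction q1 with
  | nil => intro q2 acc g; simp
  | cons h t ih =>
      intro q2 acc g
      have hlen : (h :: t).length + g = (t.length + g) + 1 := by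
        simp only [List.length_cons]; omega
      rw [hlen]
      show pvBfsA tree (t.length + g) ((t ++ q2) ++ pvGet tree h) (acc ++ [h]) = _
      rw [List.append_assoc t q2 (pvGet tree h), ih (q2 ++ pvGet tree h) (acc ++ [h]) g]
      simp [List.flatMap_cons, List.append_assoc]

lemma pvLF_nil (tree : List (String × List String)) (f : Nat) : pvLF tree f [] = [] := by
  cases f <;> rfl

lemma pvBfsA_levels (tree : List (String × List String)) :
    ∀ (f : Nat) (fr acc : List String) (g : Nat),
      pvIter tree f fr = [] →
      pvBfsA tree (pvPops tree f fr + g) fr acc = acc ++ (pvLF tree f fr).flatten := by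
  intro f
  induction f with
  | zero =>
      intro fr acc g h
      have hfr : fr = [] := h
      subst hfr
      rw [pvBfsA_nil, pvLF_nil]; simp
  | succ f ih =>
      intro fr acc g h
      cases fr with
      | nil => rw [pvBfsA_nil, pvLF_nil]; simp
      | cons q qs =>
          have h' : pvIter tree f ((q :: qs).flatMap (pvGet tree)) = [] := h
          have hp : pvPops tree (f+1) (q :: qs) + g
              = (q :: qs).length + (pvPops tree f ((q :: qs).flatMap (pvGet tree)) + g) := by
            show (q :: qs).length + pvPops tree f ((q :: qs).flatMap (pvGet tree)) + g = _
            omega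
          rw [hp]
          have hl := pvBfsA_level tree (q :: qs) [] acc
              (pvPops tree f ((q :: qs).flatMap (pvGet tree)) + g)
          rw [List.append_nil, List.nil_append] at hl
          rw [hl, ih ((q :: qs).flatMap (pvGet tree)) (acc ++ (q :: qs)) g h']
          show (acc ++ (q :: qs)) ++ (pvLF tree f ((q :: qs).flatMap (pvGet tree))).flatten
              = acc ++ ((q :: qs) :: pvLF tree f ((q :: qs).flatMap (pvGet tree))).flatten
          rw [List.flatten_cons, List.append_assoc]

-- ---- B's DFS buckets vs the level decomposition ----

lemma pvMerge_nil_left (ys : List (List String)) : pvMerge [] ys = ys := by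
  cases ys <;> rfl

lemma pvMerge_nil_right (xs : List (List String)) : pvMerge xs [] = xs := by
  cases xs <;> rfl

lemma pvLF_hom (tree : List (String × List String)) :
    ∀ (f : Nat) (xs ys : List String),
      pvMerge (pvLF tree f xs) (pvLF tree f ys) = pvLF tree f (xs ++ ys) := by
  intro f
  induction f with
  | zero =>
      intro xs ys
      cases xs <;> cases ys <;> simp [pvLF, pvMerge_nil_right]
  | succ f ih =>
      intro xs ys
      cases xs with
      | nil => rw [pvLF_nil, pvMerge_nil_left, List.nil_append]
      | cons x xs' =>
          cases ys with
          | nil => rw [pvLF_nil, pvMerge_nil_right, List.append_nil]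
          | cons y ys' =>
              show ((x :: xs') ++ (y :: ys'))
                    :: pvMerge (pvLF tree f ((x :: xs').flatMap (pvGet tree)))
                        (pvLF tree f ((y :: ys').flatMap (pvGet tree)))
                  = pvLF tree (f+1) ((x :: xs') ++ (y :: ys'))
              rw [ih, ← List.flatMap_append]
              rfl

lemma pvLevels_eq (tree : List (String × List String)) :
    ∀ (f : Nat) (n : String), pvLevels tree f n = pvLF tree f [n] := by
  intro f
  induction f with
  | zero => intro n; rfl
  | succ f ih =>
      intro n
      have hfold : ∀ (cs acc : List String),
          cs.foldl (fun rest c => pvMerge rest (pvLF tree f [c])) (pvLF tree f acc)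
            = pvLF tree f (acc ++ cs) := by
        intro cs
        induction cs with
        | nil => intro acc; simp
        | cons c cs' ihc =>
            intro acc
            show cs'.foldl _ (pvMerge (pvLF tree f acc) (pvLF tree f [c])) = _
            rw [pvLF_hom, ihc (acc ++ [c])]
            simp
      have h0 := hfold (pvGet tree n) []
      rw [pvLF_nil] at h0
      show [n] :: (pvGet tree n).foldl (fun rest c => pvMerge rest (pvLevels tree f c)) []
          = pvLF tree (f+1) [n]
      simp only [ih]
      rw [h0, List.nil_append]
      show [n] :: pvLF tree f (pvGet tree n) = pvLF tree f.succ [n]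
      have : ([n] : List String).flatMap (pvGet tree) = pvGet tree n := by
        simp [List.flatMap_cons]
      rw [show pvLF tree f.succ [n]
            = [n] :: pvLF tree f (([n] : List String).flatMap (pvGet tree)) from rfl, this]

lemma pvLF_stable (tree : List (String × List String)) :
    ∀ (f f' : Nat) (fr : List String),
      pvIter tree f fr = [] → f ≤ f' → pvLF tree f' fr = pvLF tree f fr := by
  intro f
  induction f with
  | zero =>
      intro f' fr h _
      have hfr : fr = [] := h
      subst hfr
      rw [pvLF_nil, pvLF_nil]
  | succ f ih =>
      intro f' fr h hle
      cases fr with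
      | nil => rw [pvLF_nil, pvLF_nil]
      | cons x fr' =>
          obtain ⟨f'', rfl⟩ : ∃ f'', f' = f'' + 1 := ⟨f' - 1, by omega⟩
          have h' : pvIter tree f ((x :: fr').flatMap (pvGet tree)) = [] := h
          show (x :: fr') :: pvLF tree f'' ((x :: fr').flatMap (pvGet tree))
              = (x :: fr') :: pvLF tree f ((x :: fr').flatMap (pvGet tree))
          rw [ih f'' _ h' (by omega)]

lemma foldl_append_flatten :
    ∀ (L : List (List String)) (acc : List String),
      L.foldl (fun a l => a ++ l) acc = acc ++ L.flatten := by
  intro L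
  induction L with
  | nil => intro acc; simp
  | cons l L' ih => intro acc; rw [List.foldl_cons, ih, List.flatten_cons, List.append_assoc]

-- ---- the computable closure is complete for graph reachability ----

lemma mem_stepC {tree : List (String × List String)} {s : List String} {x : String} :
    x ∈ pvStepC tree s ↔ x ∈ s ∨ ∃ y ∈ s, x ∈ pvGet tree y := by
  simp [pvStepC]

lemma stepC_mono {tree : List (String × List String)} {s t : List String}
    (h : ∀ z, z ∈ s → z ∈ t) : ∀ x, x ∈ pvStepC tree s → x ∈ pvStepC tree t := by
  intro x hx
  rcases mem_stepC.mp hx with hx | ⟨y, hy, hxy⟩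
  · exact mem_stepC.mpr (Or.inl (h x hx))
  · exact mem_stepC.mpr (Or.inr ⟨y, h y hy, hxy⟩)

lemma close_grow {tree : List (String × List String)} {s : List String} :
    ∀ (f : Nat) (x : String), x ∈ pvClose tree f s → x ∈ pvClose tree (f+1) s := by
  intro f
  induction f with
  | zero => intro x h; exact mem_stepC.mpr (Or.inl h)
  | succ f ih => intro x h; exact stepC_mono ih x h

lemma close_fuel_mono {tree : List (String × List String)} {s : List String} {x : String}
    {f f' : Nat} (hle : f ≤ f') (h : x ∈ pvClose tree f s) : x ∈ pvClose tree f' s := by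
  induction f' with
  | zero =>
      have : f = 0 := by omega
      subst this; exact h
  | succ f' ih =>
      by_cases hf : f = f' + 1
      · subst hf; exact h
      · exact close_grow f' x (ih (by omega))

lemma close_sub_base {tree : List (String × List String)} {s : List String} :
    ∀ (f : Nat) (x : String), x ∈ pvClose tree f s → x ∈ s ++ tree.flatMap Prod.snd := by
  intro f
  induction f with
  | zero => intro x h; exact List.mem_append.mpr (Or.inl h)
  | succ f ih =>
      intro x h
      rcases mem_stepC.mp h with h | ⟨y, _, hxy⟩
      · exact ih x h
      · exact List.mem_append.mpr (Or.inr (mem_pvGet_flat hxy))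

lemma close_fixpoint (tree : List (String × List String)) (s : List String) :
    ∀ (j : Nat) (x : String), x ∈ pvClose tree j s →
      x ∈ pvClose tree (s.length + (tree.flatMap Prod.snd).length + 1) s := by
  set F := s.length + (tree.flatMap Prod.snd).length + 1 with hF
  have hfix : ∃ i, i < F ∧ ∀ x, x ∈ pvClose tree (i+1) s → x ∈ pvClose tree i s := by
    by_contra hc
    push Not at hc
    have hgrow : ∀ i, i ≤ F → i ≤ (pvClose tree i s).toFinset.card := by
      intro i
      induction i with
      | zero => intro _; omega
      | succ i ih =>
          intro hiF
          obtain ⟨x, hx1, hx2⟩ := hc i (by omega)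
          have hsub : (pvClose tree i s).toFinset ⊆ (pvClose tree (i+1) s).toFinset := by
            intro z hz; exact List.mem_toFinset.mpr (close_grow i z (List.mem_toFinset.mp hz))
          have hss : (pvClose tree i s).toFinset ⊂ (pvClose tree (i+1) s).toFinset :=
            (Finset.ssubset_iff_of_subset hsub).mpr
              ⟨x, List.mem_toFinset.mpr hx1, fun hm => hx2 (List.mem_toFinset.mp hm)⟩
          have h1 := Finset.card_lt_card hss
          have h2 := ih (by omega)
          omega
    have hub : (pvClose tree F s).toFinset.card
        ≤ s.length + (tree.flatMap Prod.snd).length := by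
      have hsub : (pvClose tree F s).toFinset ⊆ (s ++ tree.flatMap Prod.snd).toFinset := by
        intro z hz
        exact List.mem_toFinset.mpr (close_sub_base F z (List.mem_toFinset.mp hz))
      have h1 := Finset.card_le_card hsub
      have h2 := List.toFinset_card_le (s ++ tree.flatMap Prod.snd)
      simp only [List.length_append] at h2
      omega
    have := hgrow F (le_refl F)
    omega
  obtain ⟨i, hiF, hfixi⟩ := hfix
  have hstat : ∀ j, i ≤ j → ∀ x, x ∈ pvClose tree j s → x ∈ pvClose tree i s := by
    intro j hij
    induction j with
    | zero =>
        have : i = 0 := by omega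
        subst this; exact fun x h => h
    | succ j ih =>
        by_cases hji : i = j + 1
        · subst hji; exact fun x h => h
        · intro x hx
          have hx' : x ∈ pvClose tree (i+1) s := stepC_mono (ih (by omega)) x hx
          exact hfixi x hx'
  intro j x hx
  by_cases hj : j ≤ F
  · exact close_fuel_mono hj hx
  · exact close_fuel_mono (by omega) (hstat j (by omega) x hx)

lemma reach_close {tree : List (String × List String)} {s : List String} {x : String}
    (h : pvReachFrom tree s x) :
    x ∈ pvClose tree (s.length + (tree.flatMap Prod.snd).length + 1) s := by
  induction h with
  | base hx => exact close_fuel_mono (Nat.zero_le _) hx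
  | @step a y _ hay ih =>
      have h1 : y ∈ pvClose tree (s.length + (tree.flatMap Prod.snd).length + 1 + 1) s :=
        mem_stepC.mpr (Or.inr ⟨a, ih, hay⟩)
      exact close_fixpoint tree s _ y h1

-- ---- chains and cycles ----

lemma reach_mono {tree : List (String × List String)} {s t : List String} {x : String}
    (hst : ∀ z ∈ s, pvReachFrom tree t z) (h : pvReachFrom tree s x) :
    pvReachFrom tree t x := by
  induction h with
  | base hx => exact hst _ hx
  | step _ hxy ih => exact pvReachFrom.step ih hxy

lemma chainReach {tree : List (String × List String)} :
    ∀ {v : List String} {a b : String},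
      List.IsChain (fun p q => q ∈ pvGet tree p) (a :: v) → b ∈ v →
      pvReachFrom tree (pvGet tree a) b := by
  intro v
  induction v with
  | nil => intro a b _ hb; cases hb
  | cons c v' ih =>
      intro a b hch hb
      have hac : c ∈ pvGet tree a := (List.isChain_cons_cons.mp hch).1
      have hch' : List.IsChain (fun p q => q ∈ pvGet tree p) (c :: v') :=
        (List.isChain_cons_cons.mp hch).2
      rcases List.mem_cons.mp hb with rfl | hb
      · exact pvReachFrom.base hac
      · exact reach_mono (fun z hz => pvReachFrom.step (pvReachFrom.base hac) hz) (ih hch' hb)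

lemma rootReach {tree : List (String × List String)} {p : List String} {a : String}
    (hch : List.IsChain (fun x y => y ∈ pvGet tree x) p) (hh : p.head? = some "root")
    (ha : a ∈ p) : pvReachFrom tree ["root"] a := by
  cases p with
  | nil => cases ha
  | cons r t =>
      have hr : r = "root" := by simpa using hh
      subst hr
      rcases List.mem_cons.mp ha with rfl | ha
      · exact pvReachFrom.base (List.mem_singleton.mpr rfl)
      · exact reach_mono
          (fun z hz => pvReachFrom.step (pvReachFrom.base (List.mem_singleton.mpr rfl)) hz)
          (chainReach hch ha)

lemma dup_split {a : String} :
    ∀ {c : List String}, List.Sublist [a, a] c → ∃ u v, c = u ++ a :: v ∧ a ∈ v := by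
  intro c
  induction c with
  | nil => intro h; simp at h
  | cons h t ih =>
      intro hs
      cases hs with
      | cons _ hs' =>
          obtain ⟨u, v, rfl, hav⟩ := ih hs'
          exact ⟨h :: u, v, rfl, hav⟩
      | cons₂ _ hs' =>
          exact ⟨[], t, rfl, List.singleton_sublist.mp hs'⟩

lemma path_of_iter (tree : List (String × List String)) :
    ∀ (d : Nat) (x : String), x ∈ pvIter tree d ["root"] →
      ∃ p : List String, p.length = d + 1 ∧
        List.IsChain (fun a b => b ∈ pvGet tree a) p ∧
        p.head? = some "root" ∧ p.getLast? = some x ∧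
        ∀ a ∈ p.dropLast, a ∈ tree.map Prod.fst := by
  intro d
  induction d with
  | zero =>
      intro x hx
      have : x = "root" := by simpa [pvIter] using hx
      subst this
      exact ⟨["root"], rfl, List.IsChain.singleton _, rfl, rfl, by simp⟩
  | succ d ih =>
      intro x hx
      have hx' : x ∈ (pvIter tree d ["root"]).flatMap (pvGet tree) := by
        have hsucc : ∀ (k : Nat) (f : List String),
            pvIter tree (k+1) f = (pvIter tree k f).flatMap (pvGet tree) := by
          intro k
          induction k with
          | zero => intro f; rfl
          | succ k ihk => intro f; exact ihk (f.flatMap (pvGet tree))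
        rw [← hsucc]; exact hx
      obtain ⟨y, hy, hxy⟩ := List.mem_flatMap.mp hx'
      obtain ⟨p, hlen, hch, hh, hl, hkeys⟩ := ih y hy
      have hpne : p ≠ [] := by intro h; subst h; simp at hlen
      refine ⟨p ++ [x], by simp [hlen], ?_, ?_, ?_, ?_⟩
      · refine List.IsChain.append hch (List.IsChain.singleton _) ?_
        intro a ha b hb
        rw [hl] at ha
        have ha' : y = a := by simpa using ha
        have hb' : x = b := by simpa using hb
        subst ha'; subst hb'
        exact hxy
      · cases p with
        | nil => exact absurd rfl hpne
        | cons r t => simpa using hh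
      · simp
      · rw [List.dropLast_concat]
        intro a ha
        have hdecomp : p.dropLast ++ [y] = p := List.dropLast_append_getLast? y hl
        rw [← hdecomp] at ha
        rcases List.mem_append.mp ha with ha | ha
        · exact hkeys a ha
        · have : a = y := by simpa using ha
          subst this
          exact pvGet_key_mem hxy

lemma iter_empty {tree : List (String × List String)} (hpre : Pre_process_inquiries tree) :
    pvIter tree ((tree.map Prod.fst).length + 1) ["root"] = [] := by
  set K := (tree.map Prod.fst).length with hK
  by_contra hne
  obtain ⟨x, hx⟩ := List.exists_mem_of_ne_nil _ hne
  obtain ⟨p, hlen, hch, hh, _, hkeys⟩ := path_of_iter tree (K + 1) x hx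
  have hdl : p.dropLast.length = K + 1 := by
    rw [List.length_dropLast, hlen]
    omega
  have hnotnd : ¬ p.dropLast.Nodup := by
    intro hnd
    have hcard : p.dropLast.toFinset.card = K + 1 := by
      rw [List.toFinset_card_of_nodup hnd, hdl]
    have hsub : p.dropLast.toFinset ⊆ (tree.map Prod.fst).toFinset := by
      intro a ha
      exact List.mem_toFinset.mpr (hkeys a (List.mem_toFinset.mp ha))
    have h1 := Finset.card_le_card hsub
    have h2 := List.toFinset_card_le (tree.map Prod.fst)
    omega
  obtain ⟨a, hsl⟩ : ∃ a, List.Sublist [a, a] p.dropLast := by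
    by_contra hc
    push Not at hc
    exact hnotnd (List.nodup_iff_sublist.mpr hc)
  have hslp : List.Sublist [a, a] p := hsl.trans (List.dropLast_sublist p)
  obtain ⟨u, v, hpd, hav⟩ := dup_split hslp
  -- a is reachable from root
  have hmem : a ∈ p := by rw [hpd]; exact List.mem_append.mpr (Or.inr List.mem_cons_self)
  have hreach : pvReachFrom tree ["root"] a := rootReach hch hh hmem
  -- a lies on a cycle: from the chain suffix a :: v, a is a proper descendant of itself
  have hsuf : List.IsSuffix (a :: v) p := ⟨u, hpd.symm⟩
  have hchav : List.IsChain (fun x y => y ∈ pvGet tree x) (a :: v) := hch.suffix hsuf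
  have hcyc : pvReachFrom tree (pvGet tree a) a := chainReach hchav hav
  have h1 : a ∈ pvReachableL tree := by
    unfold pvReachableL
    have h := reach_close hreach
    rw [(by simp only [List.length_cons, List.length_nil]; omega :
        (["root"] : List String).length + (tree.flatMap Prod.snd).length + 1
          = (tree.flatMap Prod.snd).length + 2)] at h
    exact h
  have h2 : a ∈ pvDescendL tree a := by
    unfold pvDescendL
    exact reach_close hcyc
  exact hpre a h1 h2

-- ===== VERDICT (by name: the statement is the Claim_ definition above) =====
theorem process_inquiries_spec : Claim_equal_process_inquiries := by
  intro tree _ hpre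
  unfold Spec_process_inquiries process_inquiries process_inquiries_alt
  by_cases htree : tree = []
  · simp [htree]
  · rw [if_neg htree, if_neg htree]
    set K := (tree.map Prod.fst).length with hK
    set N := (tree.flatMap Prod.snd).length with hN
    have hterm : pvIter tree (K + 1) ["root"] = [] := iter_empty hpre
    have hpops : pvPops tree (K + 1) ["root"] ≤ pvFuelA tree := by
      have h1 := pops_le tree (K + 1) ["root"]
      rw [← hN] at h1
      have h2 : (["root"] : List String).length * ((K + 1 + 1) * (N + 1) ^ (K + 1))
          = (K + 2) * (N + 1) ^ (K + 1) := by
        have hl : (["root"] : List String).length = 1 := rfl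
        rw [hl]; ring
      have h3 : (K + 2) * (N + 1) ^ (K + 1) ≤ (K + 2) * ((N + 1) ^ (K + 1) + 1) :=
        Nat.mul_le_mul_left _ (by omega)
      have h4 : pvFuelA tree = (K + 2) * ((N + 1) ^ (K + 1) + 1) := rfl
      omega
    have hfuel : pvFuelA tree
        = pvPops tree (K + 1) ["root"] + (pvFuelA tree - pvPops tree (K + 1) ["root"]) := by
      omega
    rw [hfuel, pvBfsA_levels tree (K + 1) ["root"] [] _ hterm]
    rw [foldl_append_flatten, pvLevels_eq, pvLF_stable tree (K + 1) (K + 2) ["root"] hterm (by omega)]
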